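-- pv_equiv track=rewrite | github.com/SoullessDark/2020-2-level-labs | lab_2/main.py | find_diff_in_sentence
-- ===== SOURCE A (Python) =====
-- def find_diff_in_sentence(original_sentence_tokens: tuple, suspicious_sentence_tokens: tuple, lcs: tuple) -> tuple:
--     """
--     Finds words not present in lcs.
--     :param original_sentence_tokens: a tuple of tokens
--     :param suspicious_sentence_tokens: a tuple of tokens
--     :param lcs: a longest common subsequence
--     :return: a tuple with tuples of indexes
--     """
--     sentences_check = (not isinstance(original_sentence_tokens, tuple)
--                        or not isinstance(suspicious_sentence_tokens, tuple)
--                        or not all(isinstance(i, str) for i in original_sentence_tokens)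
--                        or not all(isinstance(i, str) for i in suspicious_sentence_tokens))
--
--     lcs_check = (not isinstance(lcs, tuple)
--                  or not all(isinstance(i, str) for i in lcs))
--
--     if sentences_check or lcs_check:
--         return ()
--
--     difference_sum = []
--
--     for sentence in (original_sentence_tokens, suspicious_sentence_tokens):
--
--         difference = []
--         for i, token in enumerate(sentence):
--
--             if token not in lcs:
--                 if i == 0 or sentence[i - 1] in lcs:
--                     difference.append(i)
--                 if i == len(sentence) - 1 or sentence[i + 1] in lcs:
--                     difference.append(i + 1)
--
--         difference_sum.append(tuple(difference))
--
--     return tuple(difference_sum)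
-- ===== SOURCE B (Python) =====
-- def find_diff_in_sentence(original_sentence_tokens: tuple, suspicious_sentence_tokens: tuple, lcs: tuple) -> tuple:
--     """
--     Finds words not present in lcs (run-based single pass with a set).
--     """
--     sentences_check = (not isinstance(original_sentence_tokens, tuple)
--                        or not isinstance(suspicious_sentence_tokens, tuple)
--                        or not all(isinstance(i, str) for i in original_sentence_tokens)
--                        or not all(isinstance(i, str) for i in suspicious_sentence_tokens))
--     lcs_check = (not isinstance(lcs, tuple)
--                  or not all(isinstance(i, str) for i in lcs))
--     if sentences_check or lcs_check:
--         return ()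
--     lcs_set = set(lcs)
--     difference_sum = []
--     for sentence in (original_sentence_tokens, suspicious_sentence_tokens):
--         difference = []
--         in_run = False
--         for i, token in enumerate(sentence):
--             absent = token not in lcs_set
--             if absent and not in_run:
--                 difference.append(i)
--                 in_run = True
--             elif not absent and in_run:
--                 difference.append(i)
--                 in_run = False
--         if in_run:
--             difference.append(len(sentence))
--         difference_sum.append(tuple(difference))
--     return tuple(difference_sum)
-- ===== Notes on version B (the rewrite author's own statement) =====
-- stated objective: faster
-- what changed: Replaces A's per-token neighbour lookups (sentence[i-1]/sentence[i+1] membership tests against the lcs list at every absent token) with a single-pass run state machine over set(lcs): record a run's start when entering, its exclusive end when leaving, flushing len(sentence) at the end.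
import Mathlib
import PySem

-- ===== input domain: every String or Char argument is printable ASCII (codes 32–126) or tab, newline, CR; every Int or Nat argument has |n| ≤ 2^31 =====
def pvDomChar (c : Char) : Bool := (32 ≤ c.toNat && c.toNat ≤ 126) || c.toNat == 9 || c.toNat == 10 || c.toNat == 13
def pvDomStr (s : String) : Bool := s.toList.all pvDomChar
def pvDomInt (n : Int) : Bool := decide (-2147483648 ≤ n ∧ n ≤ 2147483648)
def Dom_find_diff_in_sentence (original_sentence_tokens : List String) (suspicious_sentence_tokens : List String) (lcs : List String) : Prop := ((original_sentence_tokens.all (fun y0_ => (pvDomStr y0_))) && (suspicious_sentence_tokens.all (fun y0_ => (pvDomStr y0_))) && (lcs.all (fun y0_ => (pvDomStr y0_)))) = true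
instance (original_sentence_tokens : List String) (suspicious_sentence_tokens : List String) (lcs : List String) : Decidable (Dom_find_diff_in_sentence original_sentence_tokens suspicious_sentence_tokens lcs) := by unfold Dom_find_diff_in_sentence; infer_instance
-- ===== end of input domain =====

-- B replaces A's per-token neighbour lookups with a single-pass run state machine over set(lcs) (alternative decomposition, same result).


-- ===== PORT A =====
-- Python A's isinstance/str validation is identically satisfied for List String arguments,
-- so the early 'return ()' branch is unreachable here and the ported body is the main loop.
-- Inner loop body of A ('for i, token in enumerate(sentence)'), kept as a named helper.
def pvStepA (sentence : List String) (lcs : List String) (diff : List Int) (p : Int × String) : List Int :=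
  if p.2 ∉ lcs then
    (diff ++ (if p.1 = 0 ∨ PySem.List.pyGetD sentence (p.1 - 1) "" ∈ lcs then [p.1] else []))
      ++ (if p.1 = (sentence.length : Int) - 1 ∨ PySem.List.pyGetD sentence (p.1 + 1) "" ∈ lcs then [p.1 + 1] else [])
  else diff

def pvDiffA (sentence : List String) (lcs : List String) : List Int :=
  (PySem.List.enumerate sentence 0).foldl (pvStepA sentence lcs) []

def find_diff_in_sentence (original_sentence_tokens : List String) (suspicious_sentence_tokens : List String) (lcs : List String) : List (List Int) :=
  [pvDiffA original_sentence_tokens lcs, pvDiffA suspicious_sentence_tokens lcs]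

-- ===== PORT B =====
-- Inner loop body of B: state (difference, in_run).
def pvStepB (lcs_set : PySem.Set String) (st : List Int × Bool) (p : Int × String) : List Int × Bool :=
  if p.2 ∉ lcs_set ∧ st.2 = false then (st.1 ++ [p.1], true)
  else if p.2 ∈ lcs_set ∧ st.2 = true then (st.1 ++ [p.1], false)
  else st

def pvDiffB (sentence : List String) (lcs_set : PySem.Set String) : List Int :=
  let st := (PySem.List.enumerate sentence 0).foldl (pvStepB lcs_set) ([], false)
  if st.2 = true then st.1 ++ [(sentence.length : Int)] else st.1

def find_diff_in_sentence_alt (original_sentence_tokens : List String) (suspicious_sentence_tokens : List String) (lcs : List String) : List (List Int) :=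
  let lcs_set := PySem.Set.ofList lcs
  [pvDiffB original_sentence_tokens lcs_set, pvDiffB suspicious_sentence_tokens lcs_set]

-- ===== PRECONDITION & SPEC =====
def Spec_find_diff_in_sentence (original_sentence_tokens : List String) (suspicious_sentence_tokens : List String) (lcs : List String) (out : List (List Int)) : Prop := out = find_diff_in_sentence_alt original_sentence_tokens suspicious_sentence_tokens lcs
instance (original_sentence_tokens : List String) (suspicious_sentence_tokens : List String) (lcs : List String) (out : List (List Int)) : Decidable (Spec_find_diff_in_sentence original_sentence_tokens suspicious_sentence_tokens lcs out) := by unfold Spec_find_diff_in_sentence; infer_instance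

-- ===== CLAIM (what is proved, stated in full; the proofs are below) =====
def Claim_equal_find_diff_in_sentence : Prop := ∀ (original_sentence_tokens : List String) (suspicious_sentence_tokens : List String) (lcs : List String), Dom_find_diff_in_sentence original_sentence_tokens suspicious_sentence_tokens lcs → Spec_find_diff_in_sentence original_sentence_tokens suspicious_sentence_tokens lcs (find_diff_in_sentence original_sentence_tokens suspicious_sentence_tokens lcs)

-- ===== LEMMAS AND PROOFS =====

-- 'the run containing position i closes at i': the next token is past the end or in lcs.
def pvCloses (lcs : List String) : List String → Bool
  | [] => true
  | u :: _ => decide (u ∈ lcs)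

-- Reference recursion: output of A's loop over suffix l starting at index i,
-- pa = 'previous token exists and is absent from lcs'.
def pvRec (lcs : List String) : List String → Int → Bool → List Int
  | [], _, _ => []
  | t :: rest, i, pa =>
    ((if t ∈ lcs then []
      else (if pa then [] else [i]) ++ (if pvCloses lcs rest then [i + 1] else []))
      ++ pvRec lcs rest (i + 1) (decide (t ∉ lcs)))

theorem pvB_eq (lcs : List String) (l : List String) : ∀ (i : Int) (acc : List Int) (b : Bool),
    (if ((PySem.List.enumerate l i).foldl (pvStepB (PySem.Set.ofList lcs)) (acc, b)).2 = true
     then ((PySem.List.enumerate l i).foldl (pvStepB (PySem.Set.ofList lcs)) (acc, b)).1 ++ [i + (l.length : Int)]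
     else ((PySem.List.enumerate l i).foldl (pvStepB (PySem.Set.ofList lcs)) (acc, b)).1)
    = acc ++ (if b && pvCloses lcs l then [i] else []) ++ pvRec lcs l i b := by
  induction l with
  | nil =>
    intro i acc b
    cases b <;> simp [PySem.List.enumerate_nil, pvCloses, pvRec]
  | cons t rest ih =>
    intro i acc b
    rw [PySem.List.enumerate_cons]
    simp only [List.foldl_cons]
    by_cases ht : t ∈ lcs
    · cases b with
      | false =>
        have hs : pvStepB (PySem.Set.ofList lcs) (acc, false) (i, t) = (acc, false) := by
          simp [pvStepB, PySem.Set.mem_ofList, ht]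
        rw [hs, show i + (((t :: rest).length : Nat) : Int) = (i + 1) + ((rest.length : Nat) : Int) by simp; omega, ih]
        simp [pvRec, pvCloses, ht]
      | true =>
        have hs : pvStepB (PySem.Set.ofList lcs) (acc, true) (i, t) = (acc ++ [i], false) := by
          simp [pvStepB, PySem.Set.mem_ofList, ht]
        rw [hs, show i + (((t :: rest).length : Nat) : Int) = (i + 1) + ((rest.length : Nat) : Int) by simp; omega, ih]
        simp [pvRec, pvCloses, ht]
    · cases b with
      | false =>
        have hs : pvStepB (PySem.Set.ofList lcs) (acc, false) (i, t) = (acc ++ [i], true) := by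
          simp [pvStepB, PySem.Set.mem_ofList, ht]
        rw [hs, show i + (((t :: rest).length : Nat) : Int) = (i + 1) + ((rest.length : Nat) : Int) by simp; omega, ih]
        simp [pvRec, pvCloses, ht]
      | true =>
        have hs : pvStepB (PySem.Set.ofList lcs) (acc, true) (i, t) = (acc, true) := by
          simp [pvStepB, PySem.Set.mem_ofList, ht]
        rw [hs, show i + (((t :: rest).length : Nat) : Int) = (i + 1) + ((rest.length : Nat) : Int) by simp; omega, ih]
        simp [pvRec, pvCloses, ht]

theorem pvA_eq (lcs : List String) (l : List String) : ∀ (pre : List String) (acc : List Int) (b : Bool),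
    b = (match pre.getLast? with | none => false | some x => decide (x ∉ lcs)) →
    (PySem.List.enumerate l (pre.length : Int)).foldl (pvStepA (pre ++ l) lcs) acc
    = acc ++ pvRec lcs l (pre.length : Int) b := by
  induction l with
  | nil => intro pre acc b _; simp [PySem.List.enumerate_nil, pvRec]
  | cons t rest ih =>
    intro pre acc b hb
    rw [PySem.List.enumerate_cons]
    simp only [List.foldl_cons]
    have hcond1 : ((pre.length : Int) = 0 ∨ PySem.List.pyGetD (pre ++ t :: rest) ((pre.length : Int) - 1) "" ∈ lcs) ↔ b = false := by
      rcases List.eq_nil_or_concat pre with h | ⟨q, x, h⟩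
      · subst h; simp at hb; simp [hb]
      · subst h
        simp only [List.concat_eq_append] at hb ⊢
        have hlen : ((q ++ [x]).length : Int) - 1 = (q.length : Int) := by simp
        rw [hlen, PySem.List.pyGetD_natCast]
        have hget : (q ++ [x] ++ t :: rest).getD q.length "" = x := by
          simp [List.getD, List.append_assoc]
        rw [hget]
        simp at hb
        constructor
        · rintro (h0 | hx)
          · omega
          · simp [hb, hx]
        · intro hf
          right
          by_contra hx
          rw [hb] at hf; simp [hx] at hf
    have hcond2 : ((pre.length : Int) = ((pre ++ t :: rest).length : Int) - 1 ∨ PySem.List.pyGetD (pre ++ t :: rest) ((pre.length : Int) + 1) "" ∈ lcs) ↔ pvCloses lcs rest = true := by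
      cases rest with
      | nil => simp [pvCloses]
      | cons u rest' =>
        have hlen : (pre.length : Int) + 1 = ((pre.length + 1 : Nat) : Int) := by push_cast; ring
        rw [hlen, PySem.List.pyGetD_natCast]
        have hget : (pre ++ t :: u :: rest').getD (pre.length + 1) "" = u := by
          simp [List.getD]
        rw [hget]
        simp [pvCloses]
        omega
    have hstep : pvStepA (pre ++ t :: rest) lcs acc ((pre.length : Int), t)
        = acc ++ (if t ∈ lcs then []
                  else (if b then [] else [(pre.length : Int)]) ++ (if pvCloses lcs rest then [(pre.length : Int) + 1] else [])) := by
      by_cases ht : t ∈ lcs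
      · simp [pvStepA, ht]
      · simp only [pvStepA]
        rw [if_pos ht, if_congr hcond1 rfl rfl, if_congr hcond2 rfl rfl]
        cases b <;> cases hcl : pvCloses lcs rest <;> simp [ht]
    rw [hstep]
    have hb' : (decide (t ∉ lcs) : Bool) = (match (pre ++ [t]).getLast? with | none => false | some x => decide (x ∉ lcs)) := by simp
    have hIH := ih (pre ++ [t]) (acc ++ (if t ∈ lcs then [] else (if b then [] else [(pre.length : Int)]) ++ (if pvCloses lcs rest then [(pre.length : Int) + 1] else []))) (decide (t ∉ lcs)) hb'
    simp only [List.append_assoc, List.singleton_append, List.length_append, List.length_cons, List.length_nil, Nat.cast_add, Nat.cast_one, Nat.cast_zero] at hIH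
    push_cast at hIH
    rw [hIH]
    simp [pvRec]

-- A's loop and B's loop compute the same per-sentence difference list.
theorem pvAB (sentence lcs : List String) : pvDiffA sentence lcs = pvDiffB sentence (PySem.Set.ofList lcs) := by
  have hA := pvA_eq lcs sentence [] [] false (by simp)
  have hB := pvB_eq lcs sentence 0 [] false
  simp only [List.nil_append, List.length_nil, Nat.cast_zero, zero_add, Bool.false_and,
    Bool.false_eq_true, if_false] at hA hB
  unfold pvDiffA pvDiffB
  rw [hA]
  exact hB.symm

-- ===== VERDICT (by name: the statement is the Claim_ definition above) =====
theorem find_diff_in_sentence_spec : Claim_equal_find_diff_in_sentence := by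
  intro o s lcs _
  unfold Spec_find_diff_in_sentence find_diff_in_sentence find_diff_in_sentence_alt
  simp [pvAB]
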